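-- pv_equiv track=rewrite | github.com/brunizzl/Informatik-Bundeswehr | 2024-Tag-6/demo.py | range_liste_impl
-- ===== SOURCE A (Python) =====
-- def range_liste_impl(start: int, stop: int, schritt: int) -> list[int]:
--     erg = []
--
--     if schritt < 0:
--         while start > stop:
--             erg.append(start)
--             start += schritt
--     elif schritt > 0:
--         while start < stop:
--             #erg = erg + [start]
--             #erg += [start]
--             erg.append(start)
--             start += schritt
--
--     return erg
-- ===== SOURCE B (Python) =====
-- def range_liste_impl(start: int, stop: int, schritt: int) -> list[int]:
--     if schritt > 0:
--         n = max(0, (stop - start + schritt - 1) // schritt)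
--     elif schritt < 0:
--         n = max(0, (start - stop - schritt - 1) // (-schritt))
--     else:
--         return []
--     return [start + i * schritt for i in range(n)]
-- ===== Notes on version B (the rewrite author's own statement) =====
-- stated objective: alternative
-- what changed: Replaces A's two step-and-compare accumulation while-loops by a closed-form ceiling-division element count followed by a direct index-to-value comprehension.
import Mathlib
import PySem

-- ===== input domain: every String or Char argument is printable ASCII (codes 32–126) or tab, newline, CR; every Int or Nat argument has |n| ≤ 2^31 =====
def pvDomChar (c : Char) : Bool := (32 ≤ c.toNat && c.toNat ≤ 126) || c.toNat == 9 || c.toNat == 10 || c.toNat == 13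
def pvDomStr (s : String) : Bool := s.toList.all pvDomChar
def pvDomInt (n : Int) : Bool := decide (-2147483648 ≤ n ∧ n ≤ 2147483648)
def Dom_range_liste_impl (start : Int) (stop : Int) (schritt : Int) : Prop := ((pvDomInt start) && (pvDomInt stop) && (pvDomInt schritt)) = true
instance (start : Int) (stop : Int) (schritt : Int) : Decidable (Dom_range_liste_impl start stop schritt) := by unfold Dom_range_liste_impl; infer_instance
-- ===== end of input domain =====

-- B replaces A's step-and-compare accumulation loops by a closed-form element count
-- followed by a direct index→value map (alternative decomposition, no asymptotic change).

-- ===== PORT A =====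
-- the 'while start > stop' loop of the schritt < 0 branch (erg.append(start); start += schritt)
def rlNeg (start stop schritt : Int) (hs : schritt < 0) : List Int :=
  if _h : start > stop then start :: rlNeg (start + schritt) stop schritt hs else []
termination_by (start - stop).toNat
decreasing_by omega

-- the 'while start < stop' loop of the schritt > 0 branch
def rlPos (start stop schritt : Int) (hs : 0 < schritt) : List Int :=
  if _h : start < stop then start :: rlPos (start + schritt) stop schritt hs else []
termination_by (stop - start).toNat
decreasing_by omega

def range_liste_impl (start : Int) (stop : Int) (schritt : Int) : List Int :=
  if hneg : schritt < 0 then rlNeg start stop schritt hneg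
  else if hpos : schritt > 0 then rlPos start stop schritt hpos
  else []

-- ===== PORT B =====
def range_liste_impl_alt (start : Int) (stop : Int) (schritt : Int) : List Int :=
  if 0 < schritt then
    (PySem.List.pyRange 0 (max 0 (PySem.Int.floordiv (stop - start + schritt - 1) schritt)) 1).map
      (fun i => start + i * schritt)
  else if schritt < 0 then
    (PySem.List.pyRange 0 (max 0 (PySem.Int.floordiv (start - stop - schritt - 1) (-schritt))) 1).map
      (fun i => start + i * schritt)
  else []

-- ===== PRECONDITION & SPEC =====
def Spec_range_liste_impl (start : Int) (stop : Int) (schritt : Int) (out : List Int) : Prop := out = range_liste_impl_alt start stop schritt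
instance (start : Int) (stop : Int) (schritt : Int) (out : List Int) : Decidable (Spec_range_liste_impl start stop schritt out) := by unfold Spec_range_liste_impl; infer_instance

-- ===== CLAIM (what is proved, stated in full; the proofs are below) =====
def Claim_equal_range_liste_impl : Prop := ∀ (start : Int) (stop : Int) (schritt : Int), Dom_range_liste_impl start stop schritt → Spec_range_liste_impl start stop schritt (range_liste_impl start stop schritt)

-- ===== LEMMAS AND PROOFS =====

-- ceiling count of the positive loop: one more step adds one to the count
lemma fdiv_step (X b : Int) (hb : 0 < b) :
    PySem.Int.floordiv (X + b) b = PySem.Int.floordiv X b + 1 := by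
  have h := (PySem.Int.floordiv_eq_iff_of_pos hb (a := X)).mp rfl
  rw [PySem.Int.floordiv_eq_iff_of_pos hb]
  constructor <;> nlinarith [h.1, h.2]

lemma fdiv_nonpos_of_lt (X b : Int) (hb : 0 < b) (hX : X < b) :
    PySem.Int.floordiv X b ≤ 0 := by
  have h := (PySem.Int.floordiv_lt_iff_lt_mul hb (a := X) (q := 1)).mpr (by linarith)
  omega

lemma fdiv_pos_of_le (X b : Int) (hb : 0 < b) (hX : b ≤ X) :
    1 ≤ PySem.Int.floordiv X b := by
  exact (PySem.Int.le_floordiv_iff_mul_le hb).mpr (by linarith)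

-- closed form of the positive loop
lemma rlPos_closed (start stop schritt : Int) (hs : 0 < schritt) :
    rlPos start stop schritt hs =
      (List.range (max 0 (PySem.Int.floordiv (stop - start + schritt - 1) schritt)).toNat).map
        (fun (k : Nat) => start + (k : Int) * schritt) := by
  fun_induction rlPos start stop schritt hs with
  | case1 start h ih =>
    have hstep : PySem.Int.floordiv (stop - start + schritt - 1) schritt
        = PySem.Int.floordiv (stop - (start + schritt) + schritt - 1) schritt + 1 := by
      have := fdiv_step (stop - (start + schritt) + schritt - 1) schritt hs
      rw [show stop - start + schritt - 1 = stop - (start + schritt) + schritt - 1 + schritt by ring, this]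
    have hge : 1 ≤ PySem.Int.floordiv (stop - start + schritt - 1) schritt :=
      fdiv_pos_of_le _ _ hs (by linarith)
    rw [ih, hstep]
    rw [show (max 0 (PySem.Int.floordiv (stop - (start + schritt) + schritt - 1) schritt + 1)).toNat
        = (max 0 (PySem.Int.floordiv (stop - (start + schritt) + schritt - 1) schritt)).toNat + 1 by omega]
    rw [List.range_succ_eq_map]
    simp only [List.map_cons, List.map_map]
    congr 1
    · push_cast; ring
    · apply List.map_congr_left; intro k _; simp only [Function.comp_apply]; push_cast; ring
  | case2 start h =>
    have h0 : PySem.Int.floordiv (stop - start + schritt - 1) schritt ≤ 0 :=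
      fdiv_nonpos_of_lt _ _ hs (by omega)
    rw [show (max 0 (PySem.Int.floordiv (stop - start + schritt - 1) schritt)).toNat = 0 by omega]
    simp

-- closed form of the negative loop
lemma rlNeg_closed (start stop schritt : Int) (hs : schritt < 0) :
    rlNeg start stop schritt hs =
      (List.range (max 0 (PySem.Int.floordiv (start - stop - schritt - 1) (-schritt))).toNat).map
        (fun (k : Nat) => start + (k : Int) * schritt) := by
  fun_induction rlNeg start stop schritt hs with
  | case1 start h ih =>
    have hb : 0 < -schritt := by omega
    have hstep : PySem.Int.floordiv (start - stop - schritt - 1) (-schritt)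
        = PySem.Int.floordiv ((start + schritt) - stop - schritt - 1) (-schritt) + 1 := by
      have := fdiv_step ((start + schritt) - stop - schritt - 1) (-schritt) hb
      rw [show start - stop - schritt - 1 = (start + schritt) - stop - schritt - 1 + -schritt by ring, this]
    have hge : 1 ≤ PySem.Int.floordiv (start - stop - schritt - 1) (-schritt) :=
      fdiv_pos_of_le _ _ hb (by omega)
    rw [ih, hstep]
    rw [show (max 0 (PySem.Int.floordiv ((start + schritt) - stop - schritt - 1) (-schritt) + 1)).toNat
        = (max 0 (PySem.Int.floordiv ((start + schritt) - stop - schritt - 1) (-schritt))).toNat + 1 by omega]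
    rw [List.range_succ_eq_map]
    simp only [List.map_cons, List.map_map]
    congr 1
    · push_cast; ring
    · apply List.map_congr_left; intro k _; simp only [Function.comp_apply]; push_cast; ring
  | case2 start h =>
    have hb : 0 < -schritt := by omega
    have h0 : PySem.Int.floordiv (start - stop - schritt - 1) (-schritt) ≤ 0 :=
      fdiv_nonpos_of_lt _ _ hb (by omega)
    rw [show (max 0 (PySem.Int.floordiv (start - stop - schritt - 1) (-schritt))).toNat = 0 by omega]
    simp

-- B's pyRange-comprehension as a List.range map
lemma alt_map (start schritt n : Int) :
    (PySem.List.pyRange 0 n 1).map (fun i => start + i * schritt)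
      = (List.range n.toNat).map (fun (k : Nat) => start + (k : Int) * schritt) := by
  rw [PySem.List.pyRange_one, List.map_map]
  simp only [Int.sub_zero]
  apply List.map_congr_left; intro k _; simp

-- ===== VERDICT (by name: the statement is the Claim_ definition above) =====
theorem range_liste_impl_spec : Claim_equal_range_liste_impl := by
  intro start stop schritt _
  unfold Spec_range_liste_impl range_liste_impl range_liste_impl_alt
  split_ifs with hneg hpos hpos'
  · omega
  · rw [rlNeg_closed, alt_map]
  · rw [rlPos_closed, alt_map]
  · rfl
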